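-- pv_equiv track=rewrite | github.com/ehsanfar/ofspy_Lite | bin/ofsLite_exploreDesigns.py | leoGen
-- ===== SOURCE A (Python) =====
-- def leoGen(N):
--     assert N<=3
--     if N == 1:
--         for i in [1,2]:
--             yield (i,)
--     elif N == 2:
--         for i in [1,2]:
--             for j in [1,2]:
--                 yield (i, i+j)
--     elif N == 3:
--         for i in [1,2]:
--             for j in [1,2]:
--                 for k in [1,2]:
--                     yield (i, i+j, i+j+k)
-- ===== SOURCE B (Python) =====
-- from itertools import product, accumulate
--
-- def leoGen(N):
--     assert N <= 3
--     if 1 <= N <= 3: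
--         for combo in product([1, 2], repeat=N):
--             yield tuple(accumulate(combo))
-- ===== Notes on version B (the rewrite author's own statement) =====
-- stated objective: idiomatic
-- what changed: Replaces the three hand-written nested-loop branches by a single itertools.product over the choice tuples turned into running sums with accumulate; same lexicographic yield order.
import Mathlib
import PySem

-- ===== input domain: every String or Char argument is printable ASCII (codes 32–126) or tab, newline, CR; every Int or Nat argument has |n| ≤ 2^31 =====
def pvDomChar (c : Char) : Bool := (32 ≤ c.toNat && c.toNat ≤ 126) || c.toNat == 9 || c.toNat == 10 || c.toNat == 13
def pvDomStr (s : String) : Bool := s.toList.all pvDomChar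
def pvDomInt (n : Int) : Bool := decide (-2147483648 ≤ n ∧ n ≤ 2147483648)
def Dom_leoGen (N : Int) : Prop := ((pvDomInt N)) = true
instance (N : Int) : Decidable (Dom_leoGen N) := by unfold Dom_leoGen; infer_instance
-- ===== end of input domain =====

-- B is the idiomatic product+accumulate form of A's three nested-loop branches; same yield order.

-- ===== PORT A =====
-- literal transliteration of A's three branches of nested for-loops over [1,2]
def leoGen (N : Int) : List (List Int) :=
  if N = 1 then
    ([1, 2] : List Int).map (fun i => [i])
  else if N = 2 then
    ([1, 2] : List Int).flatMap (fun i =>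
      ([1, 2] : List Int).map (fun j => [i, i + j]))
  else if N = 3 then
    ([1, 2] : List Int).flatMap (fun i =>
      ([1, 2] : List Int).flatMap (fun j =>
        ([1, 2] : List Int).map (fun k => [i, i + j, i + j + k])))
  else []

-- ===== PORT B =====
-- itertools.product([1,2], repeat=n), lexicographic (first coordinate outermost)
def pvProduct12 : Nat → List (List Int)
  | 0 => [[]]
  | n + 1 => ([1, 2] : List Int).flatMap (fun x => (pvProduct12 n).map (fun c => x :: c))

-- itertools.accumulate (running sums)
def pvAccum (s : Int) : List Int → List Int
  | [] => []
  | x :: xs => (s + x) :: pvAccum (s + x) xs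

def leoGen_alt (N : Int) : List (List Int) :=
  if 1 ≤ N ∧ N ≤ 3 then (pvProduct12 N.toNat).map (pvAccum 0) else []

-- ===== PRECONDITION & SPEC =====
-- A's 'assert N <= 3' raises AssertionError for N > 3; exactly those inputs are excluded.
def Pre_leoGen (N : Int) : Prop := N ≤ 3
instance (N : Int) : Decidable (Pre_leoGen N) := by unfold Pre_leoGen; infer_instance
def pvWitness_leoGen : Int := (3)

def Spec_leoGen (N : Int) (out : List (List Int)) : Prop := out = leoGen_alt N
instance (N : Int) (out : List (List Int)) : Decidable (Spec_leoGen N out) := by unfold Spec_leoGen; infer_instance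

-- ===== CLAIM =====
def Claim_equal_leoGen : Prop := ∀ (N : Int), Dom_leoGen N → Pre_leoGen N → Spec_leoGen N (leoGen N)

-- ===== LEMMAS AND PROOFS =====

-- ===== VERDICT =====
theorem leoGen_spec : Claim_equal_leoGen := by
  intro N _ hpre
  unfold Spec_leoGen
  by_cases h1 : N = 1
  · subst h1; decide
  · by_cases h2 : N = 2
    · subst h2; decide
    · by_cases h3 : N = 3
      · subst h3; decide
      · unfold leoGen leoGen_alt
        have : ¬ (1 ≤ N ∧ N ≤ 3) := by
          rintro ⟨hl, hr⟩; interval_cases N <;> simp_all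
        simp [h1, h2, h3, this]
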